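-- pv_equiv track=rewrite | github.com/Bruno-rasq/Beecrowd-solutions | DataStructuresAndLibraries/1897/1897.py | bfs
-- ===== SOURCE A (Python) =====
-- from collections import deque
--
-- def trunc_div(a, b):
--     # Divisão inteira truncada em direção a zero (como em C++)
--     if b == 0:
--         return 0  # só por segurança, mas no problema não acontece
--     return a // b if a >= 0 else -((-a) // b)
--
-- def bfs(n, n2):
--     if n == n2:
--         return 0
--
--     q = deque([(n, 0)])
--     visited = set()
--
--     while q:
--         u, steps = q.popleft()
--         if u == n2:
--             return steps
--         if u in visited:
--             continue
--         visited.add(u)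
--
--         # mesmas operações do código C++
--         q.append((u * 2, steps + 1))
--         q.append((u * 3, steps + 1))
--         q.append((trunc_div(u, 2), steps + 1))
--         q.append((trunc_div(u, 3), steps + 1))
--         q.append((u + 7, steps + 1))
--         q.append((u - 7, steps + 1))
--
--     return -1  # se não encontrar (em tese, sempre encontra)
-- ===== SOURCE B (Python) =====
-- def trunc_div(a, b):
--     if b == 0:
--         return 0
--     return a // b if a >= 0 else -((-a) // b)
--
-- def successors(u):
--     return (u * 2, u * 3, trunc_div(u, 2), trunc_div(u, 3), u + 7, u - 7)
--
-- def reachable(n2, u, limit, dead):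
--     # depth-limited DFS: can u be turned into n2 in at most `limit` operations?
--     # dead[u] = a limit within which u is known NOT to reach n2
--     if u == n2:
--         return True
--     if limit == 0:
--         return False
--     if dead.get(u, 0) >= limit:
--         return False
--     for v in successors(u):
--         if reachable(n2, v, limit - 1, dead):
--             return True
--     dead[u] = limit
--     return False
--
-- def bfs(n, n2):
--     # iterative deepening: the answer is the smallest depth limit that works
--     limit = 0
--     dead = {}
--     while not reachable(n2, n, limit, dead):
--         limit += 1
--     return limit
-- ===== Notes on version B (the rewrite author's own statement) =====
-- stated objective: alternative
-- what changed: Replaced the BFS (deque of (node,steps) pairs plus a visited set) by iterative deepening: a recursive depth-limited DFS, memoised with a dict of known 'cannot reach the target within this limit' bounds, probed at limits 0,1,2,...; the first limit that succeeds equals the BFS distance.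
import Mathlib
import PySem

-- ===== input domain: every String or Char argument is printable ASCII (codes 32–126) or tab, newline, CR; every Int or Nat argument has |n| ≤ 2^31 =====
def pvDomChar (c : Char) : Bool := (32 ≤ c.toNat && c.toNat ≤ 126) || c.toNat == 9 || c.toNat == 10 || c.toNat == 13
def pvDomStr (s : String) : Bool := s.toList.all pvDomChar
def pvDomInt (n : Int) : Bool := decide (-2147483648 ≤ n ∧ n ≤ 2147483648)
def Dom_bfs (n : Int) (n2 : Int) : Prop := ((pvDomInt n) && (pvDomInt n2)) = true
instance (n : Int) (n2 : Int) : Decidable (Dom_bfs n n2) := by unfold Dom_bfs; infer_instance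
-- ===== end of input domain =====

-- B replaces A's BFS (deque + visited set) by iterative deepening: a depth-limited
-- DFS probed at limits 0,1,2,…; the first limit that succeeds is the BFS distance
-- (objective: alternative, not faster).
-- Each port carries a Nat fuel guard only to make its loop total; on the stated
-- domain the guards are proved unreachable.

-- ===== PORT A =====
-- trunc_div: exact port ('//' on a nonnegative numerator with positive divisor is
-- PySem.Int.floordiv). Both Pythons define this same helper.
def truncDiv (a : Int) (b : Int) : Int :=
  if b = 0 then 0
  else if a ≥ 0 then PySem.Int.floordiv a b else -(PySem.Int.floordiv (-a) b)

-- Python's collections.deque (O(1) popleft/append) represented as front/back lists,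
-- back reversed; 'while q' + 'q.popleft()' is exact: none iff the deque is empty,
-- otherwise the first element and the rest.
def dequePop (front : List (Int × Int)) (back : List (Int × Int)) :
    Option ((Int × Int) × List (Int × Int) × List (Int × Int)) :=
  match front with
  | x :: f => some (x, f, back)
  | [] =>
    match back.reverse with
    | [] => none
    | x :: f => some (x, f, [])

def bfsLoop (n2 : Int) : Nat → List (Int × Int) → List (Int × Int) → Std.TreeSet Int → Int
  | fuel, front, back, visited =>
    match dequePop front back with
    | none => -1                      -- 'while q' fails: return -1
    | some ((u, steps), front', back') =>
      match fuel with
      | 0 => -1                       -- fuel guard only (totality)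
      | fuel' + 1 =>
        if u = n2 then steps
        else if visited.contains u then bfsLoop n2 fuel' front' back' visited
        else
          -- Python's set() ported as an ordered tree set (exact membership/insert on Int)
          -- six q.append(...) calls, in A's order (append = cons onto the reversed back)
          bfsLoop n2 fuel' front'
            ((u - 7, steps + 1) :: (u + 7, steps + 1) :: (truncDiv u 3, steps + 1) ::
              (truncDiv u 2, steps + 1) :: (u * 3, steps + 1) :: (u * 2, steps + 1) :: back')
            (visited.insert u)
  termination_by fuel => fuel

def pvFuel : Nat := 7 ^ 210

def bfs (n : Int) (n2 : Int) : Int :=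
  if n = n2 then 0
  else bfsLoop n2 pvFuel [(n, 0)] [] Std.TreeSet.empty

-- ===== PORT B =====
-- Source B's successors(u)
def successorsB (u : Int) : List Int :=
  [u * 2, u * 3, truncDiv u 2, truncDiv u 3, u + 7, u - 7]

-- Source B's reachable(n2, u, limit, dead): depth-limited DFS with a memo dict `dead`
-- (the dict, int -> int, ported as an ordered tree map: exact get/insert on Int keys)
-- (dead[u] = a limit within which u is known not to reach n2); the dict is threaded
-- through the recursion because Python mutates it in place, and the early-exit
-- 'for v in successors(u): if ...: return True' loop is the mutual helper reachListB.
mutual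
def reachMemo (n2 : Int) (limit : Nat) (u : Int) (dead : Std.TreeMap Int Nat) :
    Bool × Std.TreeMap Int Nat :=
  if u = n2 then (true, dead)
  else
    match limit with
    | 0 => (false, dead)
    | l + 1 =>
      if dead.getD u 0 ≥ l + 1 then (false, dead)
      else
        match reachListB n2 l (successorsB u) dead with
        | (true, d') => (true, d')
        | (false, d') => (false, d'.insert u (l + 1))
  termination_by (limit, 0)

def reachListB (n2 : Int) (l : Nat) (vs : List Int) (dead : Std.TreeMap Int Nat) :
    Bool × Std.TreeMap Int Nat :=
  match vs with
  | [] => (false, dead)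
  | v :: rest =>
    match reachMemo n2 l v dead with
    | (true, d') => (true, d')
    | (false, d') => reachListB n2 l rest d'
  termination_by (l, vs.length + 1)
end

-- Source B's 'limit = 0; dead = {}; while not reachable(n2, n, limit, dead): limit += 1'
-- (fuel guard only; proved unreachable on the stated domain)
def altLoop (n : Int) (n2 : Int) : Nat → Nat → Std.TreeMap Int Nat → Int
  | 0, _, _ => -1
  | fuel + 1, limit, dead =>
    match reachMemo n2 limit n dead with
    | (true, _) => (limit : Int)
    | (false, d') => altLoop n n2 fuel (limit + 1) d'

def pvFuelB : Nat := 200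

def bfs_alt (n : Int) (n2 : Int) : Int := altLoop n n2 pvFuelB 0 Std.TreeMap.empty

-- ===== PRECONDITION & SPEC =====
def Spec_bfs (n : Int) (n2 : Int) (out : Int) : Prop := out = bfs_alt n n2
instance (n : Int) (n2 : Int) (out : Int) : Decidable (Spec_bfs n n2 out) := by unfold Spec_bfs; infer_instance

-- ===== CLAIM (what is proved, stated in full; the proofs are below) =====
def Claim_equal_bfs : Prop := ∀ (n : Int) (n2 : Int), Dom_bfs n n2 → Spec_bfs n n2 (bfs n n2)

-- ===== LEMMAS AND PROOFS =====

-- pure depth-limited reachability predicate both ports are measured against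
def reachableB (n2 : Int) (u : Int) (limit : Nat) : Bool :=
  if u = n2 then true
  else
    match limit with
    | 0 => false
    | l + 1 => (successorsB u).any (fun v => reachableB n2 v l)

-- Reference loop the A port is reduced to: BFS over the abstract queue as one list.
def qLoop (n2 : Int) : Nat → List (Int × Int) → Std.TreeSet Int → Int
  | _, [], _ => -1
  | 0, _ :: _, _ => -1
  | fuel + 1, (u, steps) :: rest, visited =>
    if u = n2 then steps
    else if visited.contains u then qLoop n2 fuel rest visited
    else
      qLoop n2 fuel (rest ++ (successorsB u).map (fun v => (v, steps + 1)))
        (visited.insert u)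

theorem dequePop_none {f b : List (Int × Int)}
    (h : dequePop f b = none) : f ++ b.reverse = [] := by
  cases f with
  | cons x f' => simp [dequePop] at h
  | nil =>
    simp only [dequePop] at h
    cases hb : b.reverse with
    | nil => simp_all
    | cons x f' => rw [hb] at h; simp at h

theorem dequePop_some {f b f' b' : List (Int × Int)} {x : Int × Int}
    (h : dequePop f b = some (x, f', b')) : f ++ b.reverse = x :: (f' ++ b'.reverse) := by
  cases f with
  | cons y f0 =>
    simp only [dequePop, Option.some.injEq, Prod.mk.injEq] at h
    obtain ⟨rfl, rfl, rfl⟩ := h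
    simp
  | nil =>
    simp only [dequePop] at h
    cases hb : b.reverse with
    | nil => rw [hb] at h; simp at h
    | cons y f0 =>
      rw [hb] at h
      simp only [Option.some.injEq, Prod.mk.injEq] at h
      obtain ⟨rfl, rfl, rfl⟩ := h
      simp

theorem bfsLoop_eq_qLoop (n2 : Int) (fuel : Nat) :
    ∀ (front back : List (Int × Int)) (visited : Std.TreeSet Int),
      bfsLoop n2 fuel front back visited = qLoop n2 fuel (front ++ back.reverse) visited := by
  induction fuel with
  | zero =>
    intro front back visited
    rw [bfsLoop]
    cases hpop : dequePop front back with
    | none => rw [dequePop_none hpop]; simp [qLoop]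
    | some t =>
      obtain ⟨⟨u, steps⟩, f', b'⟩ := t
      rw [dequePop_some hpop]; simp [qLoop]
  | succ fuel ih =>
    intro front back visited
    rw [bfsLoop]
    cases hpop : dequePop front back with
    | none => rw [dequePop_none hpop]; simp [qLoop]
    | some t =>
      obtain ⟨⟨u, steps⟩, f', b'⟩ := t
      rw [dequePop_some hpop]
      simp only [qLoop]
      split_ifs with h1 h2
      · rfl
      · exact ih f' b' visited
      · rw [ih]
        congr 1
        simp [successorsB, List.append_assoc]

-- ---- facts about the depth-limited DFS predicate ----

theorem reach_self (t : Int) (d : Nat) : reachableB t t d = true := by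
  rw [reachableB.eq_def]; simp

theorem reach_zero {t u : Int} (h : reachableB t u 0 = true) : u = t := by
  rw [reachableB.eq_def] at h
  by_cases hut : u = t
  · exact hut
  · simp [hut] at h

theorem reach_mono : ∀ (d : Nat) {t u : Int} {e : Nat},
    reachableB t u d = true → d ≤ e → reachableB t u e = true := by
  intro d
  induction d with
  | zero =>
    intro t u e h _
    rw [reach_zero h]; exact reach_self t e
  | succ d ih =>
    intro t u e h hde
    rw [reachableB.eq_def] at h
    by_cases hut : u = t
    · rw [hut]; exact reach_self t e
    · simp only [hut, if_false] at h
      obtain ⟨e', rfl⟩ : ∃ e', e = e' + 1 := ⟨e - 1, by omega⟩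
      rw [reachableB.eq_def]
      simp only [hut, if_false]
      simp only [List.any_eq_true] at h ⊢
      obtain ⟨v, hv, hvr⟩ := h
      exact ⟨v, hv, ih hvr (by omega)⟩

theorem reach_step {t u v : Int} {d : Nat} (hv : v ∈ successorsB u)
    (h : reachableB t v d = true) : reachableB t u (d + 1) = true := by
  rw [reachableB]
  by_cases hut : u = t
  · simp [hut]
  · simp only [hut, if_false, List.any_eq_true]
    exact ⟨v, hv, h⟩

theorem reach_trans : ∀ (i : Nat) {a b c : Int} {j : Nat},
    reachableB b a i = true → reachableB c b j = true → reachableB c a (i + j) = true := by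
  intro i
  induction i with
  | zero =>
    intro a b c j h1 h2
    rw [reach_zero h1]; simpa using h2
  | succ i ih =>
    intro a b c j h1 h2
    rw [reachableB.eq_def] at h1
    by_cases hab : a = b
    · subst hab; exact reach_mono j h2 (by omega)
    · simp only [hab, if_false, List.any_eq_true] at h1
      obtain ⟨v, hv, hvr⟩ := h1
      have := ih hvr h2
      have := reach_step hv this
      simpa [Nat.add_right_comm] using this

-- path extension at the far end: if n reaches u in k steps and v is a successor of u,
-- n reaches v in k+1 steps
theorem reach_snoc : ∀ (k : Nat) {u v n : Int}, reachableB u n k = true →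
    v ∈ successorsB u → reachableB v n (k + 1) = true := by
  intro k
  induction k with
  | zero =>
    intro u v n h hv
    rw [reach_zero h]
    exact reach_step hv (reach_self v 0)
  | succ k ih =>
    intro u v n h hv
    rw [reachableB.eq_def] at h
    by_cases hnu : n = u
    · subst hnu
      exact reach_mono 1 (reach_step hv (reach_self v 0)) (by omega)
    · simp only [hnu, if_false, List.any_eq_true] at h
      obtain ⟨w, hw, hwr⟩ := h
      exact reach_step hw (ih hwr hv)

-- ---- reachability of every 32-bit pair within 99 steps ----

theorem truncDiv_two_natAbs (m : Int) : (truncDiv m 2).natAbs = m.natAbs / 2 := by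
  unfold truncDiv
  rw [if_neg (by norm_num)]
  by_cases hm : m ≥ 0
  · rw [if_pos hm, PySem.Int.floordiv_eq_ediv_of_pos (by norm_num)]
    omega
  · rw [if_neg hm, PySem.Int.floordiv_eq_ediv_of_pos (by norm_num)]
    omega

theorem to_zero : ∀ (k : Nat) (m : Int), m.natAbs ≤ 2 ^ k → reachableB 0 m (k + 1) = true := by
  intro k
  induction k with
  | zero =>
    intro m hm
    by_cases h0 : m = 0
    · rw [h0]; exact reach_self 0 1
    · have hv : (truncDiv m 2).natAbs = 0 := by
        rw [truncDiv_two_natAbs]; simp at hm; omega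
      have hv0 : truncDiv m 2 = 0 := by omega
      have hmem : truncDiv m 2 ∈ successorsB m := by simp [successorsB]
      have := reach_step hmem (by rw [hv0]; exact reach_self 0 0)
      simpa using this
  | succ k ih =>
    intro m hm
    by_cases h0 : m = 0
    · rw [h0]; exact reach_self 0 (k + 2)
    · have hv : (truncDiv m 2).natAbs ≤ 2 ^ k := by
        rw [truncDiv_two_natAbs]
        have : (2:Nat) ^ (k+1) = 2 * 2 ^ k := by ring
        omega
      have hmem : truncDiv m 2 ∈ successorsB m := by simp [successorsB]
      exact reach_step hmem (ih _ hv)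

theorem from_zero : ∀ (k : Nat) (m : Int), m.natAbs ≤ 2 ^ k →
    reachableB m 0 (5 + 2 * k) = true := by
  intro k
  induction k with
  | zero =>
    intro m hm
    simp only [pow_zero] at hm
    have hb : -1 ≤ m ∧ m ≤ 1 := by omega
    obtain ⟨hb1, hb2⟩ := hb
    interval_cases m
    · decide
    · decide
    · decide
  | succ k ih =>
    intro m hm
    by_cases hsmall : m.natAbs ≤ 2 ^ k
    · exact reach_mono _ (ih m hsmall) (by omega)
    · have h2 : (2:Nat) ^ (k+1) = 2 * 2 ^ k := by ring
      have h1 : (1:Nat) ≤ 2 ^ k := Nat.one_le_two_pow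
      by_cases hev : m % 2 = 0
      · -- even: m = 2 * h, reach h then double
        obtain ⟨h, rfl⟩ : ∃ h, m = 2 * h := ⟨m / 2, by omega⟩
        have hh : h.natAbs ≤ 2 ^ k := by omega
        have hmem : h * 2 ∈ successorsB h := by simp [successorsB]
        have : reachableB (h * 2) 0 (5 + 2 * k + 1) = true :=
          reach_trans _ (ih h hh) (reach_step hmem (reach_self _ 0))
        have h2h : h * 2 = 2 * h := by ring
        rw [h2h] at this
        exact reach_mono _ this (by omega)
      · -- odd: k = 0 is impossible here; m = 2*h ± 7 with |h| ≤ 2^k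
        rcases Nat.eq_zero_or_pos k with hk0 | hkpos
        · exfalso; subst hk0; simp at hsmall hm; omega
        have h2k : (2:Nat) ≤ 2 ^ k := by
          calc (2:Nat) = 2 ^ 1 := by norm_num
          _ ≤ 2 ^ k := Nat.pow_le_pow_right (by norm_num) hkpos
        by_cases hpos : 0 < m
        · obtain ⟨h, rfl⟩ : ∃ h, m = 2 * h + 7 := ⟨(m - 7) / 2, by omega⟩
          have hh : h.natAbs ≤ 2 ^ k := by omega
          have hmem1 : h * 2 ∈ successorsB h := by simp [successorsB]
          have hmem2 : h * 2 + 7 ∈ successorsB (h * 2) := by simp [successorsB]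
          have hr : reachableB (h * 2 + 7) 0 (5 + 2 * k + 1 + 1) = true :=
            reach_trans _ (reach_trans _ (ih h hh) (reach_step hmem1 (reach_self _ 0)))
              (reach_step hmem2 (reach_self _ 0))
          have he : h * 2 + 7 = 2 * h + 7 := by ring
          rw [he] at hr
          exact reach_mono _ hr (by omega)
        · obtain ⟨h, rfl⟩ : ∃ h, m = 2 * h - 7 := ⟨(m + 7) / 2, by omega⟩
          have hh : h.natAbs ≤ 2 ^ k := by omega
          have hmem1 : h * 2 ∈ successorsB h := by simp [successorsB]
          have hmem2 : h * 2 - 7 ∈ successorsB (h * 2) := by simp [successorsB]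
          have hr : reachableB (h * 2 - 7) 0 (5 + 2 * k + 1 + 1) = true :=
            reach_trans _ (reach_trans _ (ih h hh) (reach_step hmem1 (reach_self _ 0)))
              (reach_step hmem2 (reach_self _ 0))
          have he : h * 2 - 7 = 2 * h - 7 := by ring
          rw [he] at hr
          exact reach_mono _ hr (by omega)

theorem reach_dom (n n2 : Int) (h1 : n.natAbs ≤ 2 ^ 31) (h2 : n2.natAbs ≤ 2 ^ 31) :
    reachableB n2 n 99 = true := by
  have ha : reachableB 0 n 32 = true := to_zero 31 n h1
  have hb : reachableB n2 0 67 = true := from_zero 31 n2 h2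
  exact reach_trans 32 ha hb

-- ---- soundness of the BFS loop: a returned value is a path length from n ----

theorem qLoop_sound (n n2 : Int) : ∀ (fuel : Nat) (q : List (Int × Int)) (visited : Std.TreeSet Int),
    (∀ p ∈ q, ∃ k : Nat, p.2 = (k : Int) ∧ reachableB p.1 n k = true) →
    qLoop n2 fuel q visited = -1 ∨
      ∃ k : Nat, qLoop n2 fuel q visited = (k : Int) ∧ reachableB n2 n k = true := by
  intro fuel
  induction fuel with
  | zero =>
    intro q visited hq
    cases q with
    | nil => left; rfl
    | cons p rest => left; rfl
  | succ fuel ih =>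
    intro q visited hq
    cases q with
    | nil => left; rfl
    | cons p rest =>
      obtain ⟨u, s⟩ := p
      rw [qLoop]
      by_cases hun : u = n2
      · right
        obtain ⟨k, hk, hr⟩ := hq (u, s) (by simp)
        subst hun
        exact ⟨k, by simpa [hk], hr⟩
      · rw [if_neg hun]
        by_cases hv : visited.contains u = true
        · rw [if_pos hv]
          exact ih rest visited (fun p hp => hq p (by simp [hp]))
        · rw [if_neg hv]
          apply ih
          intro p hp
          rcases List.mem_append.mp hp with hp1 | hp2
          · exact hq p (by simp [hp1])
          · obtain ⟨v, hvmem, rfl⟩ := List.mem_map.mp hp2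
            obtain ⟨k, hk, hr⟩ := hq (u, s) (by simp)
            exact ⟨k + 1, by simp only at hk ⊢; omega, reach_snoc k hr hvmem⟩

-- ---- fuel bookkeeping ----

def REQ : Nat → Nat → Nat
  | 0, M => M + 1
  | K + 1, M => M + 1 + REQ K (7 * M + 29)

theorem REQ_succ (K M : Nat) : REQ (K + 1) M = M + 1 + REQ K (7 * M + 29) := rfl

theorem REQ_pos : ∀ (K M : Nat), M + 1 ≤ REQ K M := by
  intro K
  cases K with
  | zero => intro M; simp [REQ]
  | succ K => intro M; rw [REQ_succ]; omega

theorem REQ_mono_M : ∀ (K : Nat) {M M' : Nat}, M ≤ M' → REQ K M ≤ REQ K M' := by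
  intro K
  induction K with
  | zero => intro M M' h; simp [REQ]; omega
  | succ K ih =>
    intro M M' h
    rw [REQ_succ, REQ_succ]
    have := ih (show 7 * M + 29 ≤ 7 * M' + 29 by omega)
    omega

theorem REQ_add : ∀ (K M c : Nat), REQ K M + c ≤ REQ K (M + c) := by
  intro K
  induction K with
  | zero => intro M c; simp [REQ]; omega
  | succ K ih =>
    intro M c
    rw [REQ_succ, REQ_succ]
    have h1 := ih (7 * M + 29) c
    have h2 := REQ_mono_M K (show 7 * M + 29 + c ≤ 7 * (M + c) + 29 by omega)
    omega

theorem REQ_mono_K : ∀ (K : Nat) (M : Nat), REQ K M ≤ REQ (K + 1) M := by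
  intro K
  induction K with
  | zero => intro M; rw [REQ_succ]; have := REQ_pos 0 (7 * M + 29); simp [REQ]
  | succ K ih =>
    intro M
    rw [REQ_succ, REQ_succ (K+1)]
    have := ih (7 * M + 29)
    omega

theorem REQ_mono_K' : ∀ {K K' : Nat} (M : Nat), K ≤ K' → REQ K M ≤ REQ K' M := by
  intro K K' M h
  obtain ⟨c, rfl⟩ := Nat.exists_eq_add_of_le h
  clear h
  induction c with
  | zero => exact le_refl _
  | succ c ih =>
    calc REQ K M ≤ REQ (K + c) M := ih
    _ ≤ REQ (K + c + 1) M := REQ_mono_K _ _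

theorem REQ_bound : ∀ (K M : Nat), REQ K M ≤ 49 ^ (K + 1) * (M + 30) := by
  intro K
  induction K with
  | zero => intro M; simp [REQ]; nlinarith
  | succ K ih =>
    intro M
    rw [REQ_succ]
    have h1 := ih (7 * M + 29)
    have h2 : (1:Nat) ≤ 49 ^ (K + 1) := Nat.one_le_pow _ _ (by norm_num)
    have h3 : (49:Nat) ^ (K + 1 + 1) = 49 * 49 ^ (K + 1) := by ring
    nlinarith

-- ---- invariants of the BFS state ----

def Levels (q : List (Int × Int)) (m : Int) : Prop :=
  ∃ qa qb, q = qa ++ qb ∧ (∀ p ∈ qa, p.2 = m) ∧ (∀ p ∈ qb, p.2 = m + 1)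

def DoneInv (n2 : Int) (q : List (Int × Int)) (done : List (Int × Int)) (m : Int) : Prop :=
  ∀ p ∈ done, p.1 ≠ n2 ∧ p.2 ≤ m ∧
    ∀ v ∈ successorsB p.1, (∃ t', (v, t') ∈ done) ∨ (∃ s', (v, s') ∈ q ∧ s' ≤ p.2 + 1)

def VisEq (visited : Std.TreeSet Int) (done : List (Int × Int)) : Prop :=
  ∀ x : Int, visited.contains x = true ↔ ∃ t, (x, t) ∈ done

theorem mem_Levels {q : List (Int × Int)} {m : Int} (h : Levels q m) {p : Int × Int}
    (hp : p ∈ q) : p.2 = m ∨ p.2 = m + 1 := by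
  obtain ⟨qa, qb, rfl, ha, hb⟩ := h
  rcases List.mem_append.mp hp with h1 | h2
  · exact Or.inl (ha p h1)
  · exact Or.inr (hb p h2)

theorem Levels_head_all {x : Int × Int} {rest : List (Int × Int)} {m : Int}
    (h : Levels (x :: rest) m) : x.2 = m ∨ ∀ p ∈ x :: rest, p.2 = m + 1 := by
  obtain ⟨qa, qb, heq, ha, hb⟩ := h
  cases qa with
  | nil =>
    have hqb : qb = x :: rest := by simpa using heq.symm
    right
    intro p hp
    exact hb p (by rw [hqb]; exact hp)
  | cons a qa' =>
    obtain ⟨hax, hrest⟩ : x = a ∧ rest = qa' ++ qb := by simpa using heq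
    left
    rw [hax]
    exact ha a (by simp)

theorem Levels_tail {x : Int × Int} {rest : List (Int × Int)} {m : Int}
    (h : Levels (x :: rest) m) : Levels rest m := by
  obtain ⟨qa, qb, heq, ha, hb⟩ := h
  cases qa with
  | nil =>
    have hqb : qb = x :: rest := by simpa using heq.symm
    refine ⟨[], rest, by simp, by simp, ?_⟩
    intro p hp
    exact hb p (by rw [hqb]; simp [hp])
  | cons a qa' =>
    obtain ⟨hax, hrest⟩ : x = a ∧ rest = qa' ++ qb := by simpa using heq
    exact ⟨qa', qb, hrest, fun p hp => ha p (by simp [hp]), hb⟩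

theorem Levels_all (q : List (Int × Int)) (m : Int) (h : ∀ p ∈ q, p.2 = m + 1) :
    Levels q (m + 1) := ⟨q, [], by simp, h, by simp⟩

theorem Levels_expand {u0 : Int} {s0 m : Int} {rest ch : List (Int × Int)}
    (h : Levels ((u0, s0) :: rest) m) (hs0 : s0 = m) (hch : ∀ p ∈ ch, p.2 = m + 1) :
    Levels (rest ++ ch) m := by
  obtain ⟨qa, qb, heq, ha, hb⟩ := h
  cases qa with
  | nil =>
    exfalso
    have hqb : qb = (u0, s0) :: rest := by simpa using heq.symm
    have : ((u0, s0) : Int × Int) ∈ qb := by rw [hqb]; simp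
    have := hb _ this
    simp at this
    omega
  | cons a qa' =>
    obtain ⟨hax, hrest⟩ : (u0, s0) = a ∧ rest = qa' ++ qb := by simpa using heq
    refine ⟨qa', qb ++ ch, by rw [hrest, List.append_assoc], fun p hp => ha p (by simp [hp]), ?_⟩
    intro p hp
    rcases List.mem_append.mp hp with h1 | h2
    · exact hb p h1
    · exact hch p h2

theorem DoneInv_mono_m {n2 : Int} {q done : List (Int × Int)} {m m' : Int}
    (h : DoneInv n2 q done m) (hm : m ≤ m') : DoneInv n2 q done m' := by
  intro p hp
  obtain ⟨h1, h2, h3⟩ := h p hp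
  exact ⟨h1, by omega, h3⟩

theorem DoneInv_tail {n2 : Int} {x : Int × Int} {rest done : List (Int × Int)} {m : Int}
    (h : DoneInv n2 (x :: rest) done m) (hx : ∃ t, (x.1, t) ∈ done) :
    DoneInv n2 rest done m := by
  intro p hp
  obtain ⟨h1, h2, h3⟩ := h p hp
  refine ⟨h1, h2, ?_⟩
  intro v hv
  rcases h3 v hv with hd | ⟨s', hs', hle⟩
  · exact Or.inl hd
  · rcases List.mem_cons.mp hs' with heq | hmem
    · obtain ⟨t, ht⟩ := hx
      left
      exact ⟨t, by rw [show v = x.1 from congrArg Prod.fst heq.symm ▸ rfl]; exact ht⟩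
    · exact Or.inr ⟨s', hmem, hle⟩

theorem DoneInv_expand {n2 u0 : Int} {s0 m : Int} {rest done : List (Int × Int)}
    (h : DoneInv n2 ((u0, s0) :: rest) done m) (hs0 : s0 ≤ m) (hne : u0 ≠ n2) :
    DoneInv n2 (rest ++ (successorsB u0).map (fun v => (v, s0 + 1))) ((u0, s0) :: done) m := by
  intro p hp
  rcases List.mem_cons.mp hp with rfl | hmem
  · refine ⟨hne, hs0, ?_⟩
    intro v hv
    right
    exact ⟨s0 + 1, List.mem_append.mpr (Or.inr (List.mem_map.mpr ⟨v, hv, rfl⟩)), by omega⟩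
  · obtain ⟨h1, h2, h3⟩ := h p hmem
    refine ⟨h1, h2, ?_⟩
    intro v hv
    rcases h3 v hv with hd | ⟨s', hs', hle⟩
    · exact Or.inl (by obtain ⟨t', ht'⟩ := hd; exact ⟨t', by simp [ht']⟩)
    · rcases List.mem_cons.mp hs' with heq | hmem'
      · left
        refine ⟨s0, ?_⟩
        have hv : v = u0 := by
          have := congrArg Prod.fst heq
          simpa using this
        rw [hv]; simp
      · exact Or.inr ⟨s', List.mem_append.mpr (Or.inl hmem'), hle⟩

theorem VisEq_empty : VisEq Std.TreeSet.empty [] := by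
  intro x
  constructor
  · intro h; rw [Std.TreeSet.contains_of_isEmpty rfl] at h; simp at h
  · rintro ⟨t, ht⟩; simp at ht

theorem VisEq_add {visited : Std.TreeSet Int} {done : List (Int × Int)} {u0 : Int} (s0 : Int)
    (h : VisEq visited done) : VisEq (visited.insert u0) ((u0, s0) :: done) := by
  intro x
  have hci : (visited.insert u0).contains x = (x == u0 || visited.contains x) := by
    rw [Std.TreeSet.contains_insert]
    congr 1
    simp only [beq_eq_beq, Std.LawfulEqCmp.compare_eq_iff_eq]
    exact eq_comm
  rw [hci]
  simp only [Bool.or_eq_true, beq_iff_eq]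
  constructor
  · rintro (rfl | hx)
    · exact ⟨s0, by simp⟩
    · obtain ⟨t, ht⟩ := (h x).mp hx
      exact ⟨t, by simp [ht]⟩
  · rintro ⟨t, ht⟩
    rcases List.mem_cons.mp ht with heq | hmem
    · left
      have := congrArg Prod.fst heq
      simpa using this
    · right; exact (h x).mpr ⟨t, hmem⟩

-- ---- completeness: the BFS loop returns a value ≤ any witnessed distance ----

def W1 (n2 : Int) (K : Nat) : Prop :=
  ∀ (fuel : Nat) (xs ys : List (Int × Int)) (u : Int) (s : Int)
    (done : List (Int × Int)) (visited : Std.TreeSet Int) (m S : Int),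
    Levels (xs ++ (u, s) :: ys) m → 0 ≤ m →
    DoneInv n2 (xs ++ (u, s) :: ys) done m → VisEq visited done →
    s ≤ S → reachableB n2 u K = true →
    REQ K ((xs ++ (u, s) :: ys).length + 6 * xs.length) ≤ fuel →
    0 ≤ qLoop n2 fuel (xs ++ (u, s) :: ys) visited ∧
      qLoop n2 fuel (xs ++ (u, s) :: ys) visited ≤ S + (K : Int)

def W2 (n2 : Int) (K : Nat) : Prop :=
  ∀ (fuel : Nat) (q done : List (Int × Int)) (visited : Std.TreeSet Int) (m S : Int) (u t : Int),
    Levels q m → 0 ≤ m → DoneInv n2 q done m → VisEq visited done →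
    (u, t) ∈ done → m ≤ S → reachableB n2 u (K + 1) = true →
    REQ K (7 * q.length + 29) ≤ fuel →
    0 ≤ qLoop n2 fuel q visited ∧ qLoop n2 fuel q visited ≤ S + (K : Int) + 1

theorem reach_succ_iff {t u : Int} (h : ¬ u = t) (l : Nat) :
    reachableB t u (l + 1) = (successorsB u).any (fun v => reachableB t v l) := by
  rw [reachableB.eq_def]; simp [h]

theorem w2_step (n2 : Int) (K : Nat) (hw1 : W1 n2 K)
    (hw2prev : ∀ K', K' < K → W2 n2 K') : W2 n2 K := by
  intro fuel q done visited m S u t hlev hm hdone hvis hmem hmS hreach hfuel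
  obtain ⟨hune, htm, hchild⟩ := hdone (u, t) hmem
  simp only at hune htm hchild
  rw [reach_succ_iff hune] at hreach
  simp only [List.any_eq_true] at hreach
  obtain ⟨v, hv, hvr⟩ := hreach
  rcases hchild v hv with ⟨t', ht'⟩ | ⟨s', hs', hsle⟩
  · -- the relevant successor was itself already expanded
    obtain ⟨hvne, -, -⟩ := hdone (v, t') ht'
    simp only at hvne
    cases K with
    | zero => exact absurd (reach_zero hvr) hvne
    | succ K' =>
      obtain ⟨hA, hB⟩ := hw2prev K' (by omega) fuel q done visited m S v t' hlev hm hdone hvis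
        ht' hmS hvr (le_trans (REQ_mono_K K' _) hfuel)
      exact ⟨hA, by push_cast at hB ⊢; omega⟩
  · -- the relevant successor is still queued
    obtain ⟨xs, ys, rfl⟩ := List.append_of_mem hs'
    have hs'S : s' ≤ S + 1 := by omega
    have hfuel' : REQ K ((xs ++ (v, s') :: ys).length + 6 * xs.length) ≤ fuel := by
      refine le_trans (REQ_mono_M K ?_) hfuel
      simp [List.length_append]
      omega
    obtain ⟨hA, hB⟩ := hw1 fuel xs ys v s' done visited m (S + 1) hlev hm hdone hvis hs'S hvr hfuel'
    exact ⟨hA, by omega⟩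

-- expanding the head of the queue when it is the entry the completeness witness sits on
theorem w1_expand_head (n2 : Int) (K' : Nat) (hw1K' : W1 n2 K') (f : Nat)
    (ys : List (Int × Int)) (u : Int) (s : Int) (done : List (Int × Int))
    (visited : Std.TreeSet Int) (m S : Int)
    (hlev : Levels ((u, s) :: ys) m) (hm : 0 ≤ m) (hs0 : s = m)
    (hdone : DoneInv n2 ((u, s) :: ys) done m) (hvis : VisEq visited done)
    (hsS : s ≤ S) (hun : ¬ u = n2) (hvisu : ¬ visited.contains u = true)
    (hex : ∃ v ∈ successorsB u, reachableB n2 v K' = true)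
    (hfuel : REQ (K' + 1) (((u, s) :: ys).length) ≤ f + 1) :
    0 ≤ qLoop n2 (f + 1) ((u, s) :: ys) visited ∧
      qLoop n2 (f + 1) ((u, s) :: ys) visited ≤ S + (K' : Int) + 1 := by
  obtain ⟨v, hv, hvr⟩ := hex
  simp only [qLoop, if_neg hun, if_neg hvisu]
  have hch : ∀ p ∈ (successorsB u).map (fun w => (w, s + 1)), p.2 = m + 1 := by
    intro p hp
    obtain ⟨w, -, rfl⟩ := List.mem_map.mp hp
    simp [hs0]
  have hvq : (v, s + 1) ∈ ys ++ (successorsB u).map (fun w => (w, s + 1)) :=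
    List.mem_append.mpr (Or.inr (List.mem_map.mpr ⟨v, hv, rfl⟩))
  obtain ⟨xs1, ys1, hqeq⟩ := List.append_of_mem hvq
  have hlev' : Levels (xs1 ++ (v, s + 1) :: ys1) m := by
    rw [← hqeq]; exact Levels_expand hlev hs0 hch
  have hdone' : DoneInv n2 (xs1 ++ (v, s + 1) :: ys1) ((u, s) :: done) m := by
    rw [← hqeq]; exact DoneInv_expand hdone (by omega) hun
  have hlen : xs1.length + 1 + ys1.length = ys.length + 6 := by
    have := congrArg List.length hqeq
    simp [List.length_append, successorsB] at this
    omega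
  have hfuel' : REQ K' ((xs1 ++ (v, s + 1) :: ys1).length + 6 * xs1.length) ≤ f := by
    rw [REQ_succ] at hfuel
    simp only [List.length_cons] at hfuel
    have hmono := REQ_mono_M K'
      (show (xs1 ++ (v, s + 1) :: ys1).length + 6 * xs1.length ≤ 7 * (ys.length + 1) + 29 by
        simp [List.length_append]; omega)
    omega
  obtain ⟨hA, hB⟩ := hw1K' f xs1 ys1 v (s + 1) ((u, s) :: done) (visited.insert u) m
    (S + 1) hlev' hm hdone' (VisEq_add s hvis) (by omega) hvr hfuel'
  rw [hqeq]
  exact ⟨hA, by omega⟩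

theorem w1_step (n2 : Int) (K : Nat)
    (hw1prev : ∀ K', K' < K → W1 n2 K') (hw2prev : ∀ K', K' < K → W2 n2 K') : W1 n2 K := by
  intro fuel
  induction fuel with
  | zero =>
    intro xs ys u s done visited m S hlev hm hdone hvis hsS hreach hfuel
    have := REQ_pos K ((xs ++ (u, s) :: ys).length + 6 * xs.length)
    omega
  | succ f ihf =>
    intro xs ys u s done visited m S hlev hm hdone hvis hsS hreach hfuel
    cases xs with
    | nil =>
      simp only [List.nil_append] at hlev hdone hfuel ⊢
      by_cases hun : u = n2
      · rcases mem_Levels hlev (show ((u, s) : Int × Int) ∈ (u, s) :: ys by simp) with hs | hs <;>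
          · constructor
            · simp only [qLoop, if_pos hun]; omega
            · simp only [qLoop, if_pos hun]; omega
      · have hKpos : K ≠ 0 := fun h0 => hun (by subst h0; exact reach_zero hreach)
        obtain ⟨K', rfl⟩ : ∃ K', K = K' + 1 := ⟨K - 1, by omega⟩
        rw [reach_succ_iff hun] at hreach
        simp only [List.any_eq_true] at hreach
        by_cases hvisu : visited.contains u = true
        · -- already expanded: fall back to the done-witness argument
          obtain ⟨t, hut⟩ := (hvis u).mp hvisu
          have hsm : s = m ∨ s = m + 1 :=
            mem_Levels hlev (show ((u, s) : Int × Int) ∈ (u, s) :: ys by simp)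
          have hfuel' : REQ K' (7 * ys.length + 29) ≤ f := by
            rw [REQ_succ] at hfuel
            simp only [List.length_cons, List.length_nil, Nat.mul_zero, Nat.add_zero] at hfuel
            have hmono := REQ_mono_M K'
              (show 7 * ys.length + 29 ≤ 7 * (ys.length + 1) + 29 by omega)
            omega
          obtain ⟨hA, hB⟩ := hw2prev K' (by omega) f ys done visited m S u t
            (Levels_tail hlev) hm (DoneInv_tail hdone ⟨t, hut⟩) hvis hut (by omega)
            (by rw [reach_succ_iff hun]; simpa [List.any_eq_true] using hreach) hfuel'
          simp only [qLoop, if_neg hun, if_pos hvisu]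
          exact ⟨hA, by push_cast at hB ⊢; omega⟩
        · -- expand the witness, after normalising the level base
          rcases Levels_head_all hlev with hs0 | hall
          · obtain ⟨hA, hB⟩ := w1_expand_head n2 K' (hw1prev K' (by omega)) f ys u s done
              visited m S hlev hm hs0 hdone hvis hsS hun hvisu hreach (by simpa using hfuel)
            exact ⟨hA, by push_cast at hB ⊢; omega⟩
          · have hs0 : s = m + 1 := hall (u, s) (by simp)
            obtain ⟨hA, hB⟩ := w1_expand_head n2 K' (hw1prev K' (by omega)) f ys u s done
              visited (m + 1) S (Levels_all _ m hall) (by omega) hs0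
              (DoneInv_mono_m hdone (by omega)) hvis hsS hun hvisu hreach (by simpa using hfuel)
            exact ⟨hA, by push_cast at hB ⊢; omega⟩
    | cons x xs' =>
      obtain ⟨u0, s0⟩ := x
      simp only [List.cons_append] at hlev hdone hfuel ⊢
      have hwit : ((u, s) : Int × Int) ∈ (u0, s0) :: (xs' ++ (u, s) :: ys) := by simp
      by_cases h0n : u0 = n2
      · -- an earlier queue entry already is the target: it is no deeper than the witness
        have hbound : 0 ≤ s0 ∧ s0 ≤ S := by
          rcases Levels_head_all hlev with h | hall
          · simp only at h
            rcases mem_Levels hlev hwit with hs | hs <;> constructor <;> omega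
          · have h1 : s0 = m + 1 := hall (u0, s0) (by simp)
            have h2 : s = m + 1 := hall (u, s) hwit
            constructor <;> omega
        constructor
        · simp only [qLoop, if_pos h0n]; omega
        · simp only [qLoop, if_pos h0n]; omega
      · by_cases hvis0 : visited.contains u0 = true
        · -- skip an already-expanded earlier entry
          obtain ⟨t0, h0t⟩ := (hvis u0).mp hvis0
          have hfuel' : REQ K ((xs' ++ (u, s) :: ys).length + 6 * xs'.length) ≤ f := by
            have harith : (xs' ++ (u, s) :: ys).length + 6 * xs'.length + 7 =
                ((u0, s0) :: (xs' ++ (u, s) :: ys)).length + 6 * ((u0, s0) :: xs').length := by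
              simp [List.length_append]
              omega
            have hadd := REQ_add K ((xs' ++ (u, s) :: ys).length + 6 * xs'.length) 7
            rw [harith] at hadd
            simp only [List.length_cons] at hadd hfuel
            omega
          obtain ⟨hA, hB⟩ := ihf xs' ys u s done visited m S (Levels_tail hlev) hm
            (DoneInv_tail hdone ⟨t0, h0t⟩) hvis hsS hreach hfuel'
          simp only [qLoop, if_neg h0n, if_pos hvis0]
          exact ⟨hA, hB⟩
        · -- expand an earlier entry; the witness survives in the tail
          have hcore : ∀ m' : Int, Levels ((u0, s0) :: (xs' ++ (u, s) :: ys)) m' → 0 ≤ m' →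
              s0 = m' → DoneInv n2 ((u0, s0) :: (xs' ++ (u, s) :: ys)) done m' →
              0 ≤ qLoop n2 (f + 1) ((u0, s0) :: (xs' ++ (u, s) :: ys)) visited ∧
                qLoop n2 (f + 1) ((u0, s0) :: (xs' ++ (u, s) :: ys)) visited ≤ S + (K : Int) := by
            intro m' hlev' hm' hs0' hdone'
            have hch : ∀ p ∈ (successorsB u0).map (fun w => (w, s0 + 1)), p.2 = m' + 1 := by
              intro p hp
              obtain ⟨w, -, rfl⟩ := List.mem_map.mp hp
              simp [hs0']
            have hlevx : Levels (xs' ++ (u, s) :: (ys ++ (successorsB u0).map (fun w => (w, s0 + 1)))) m' := by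
              have := Levels_expand hlev' hs0' hch
              simpa [List.append_assoc] using this
            have hdonex : DoneInv n2
                (xs' ++ (u, s) :: (ys ++ (successorsB u0).map (fun w => (w, s0 + 1))))
                ((u0, s0) :: done) m' := by
              have := DoneInv_expand hdone' (by omega) h0n
              simpa [List.append_assoc] using this
            have hfuel' : REQ K ((xs' ++ (u, s) :: (ys ++ (successorsB u0).map (fun w => (w, s0 + 1)))).length
                + 6 * xs'.length) ≤ f := by
              have harith : (xs' ++ (u, s) :: (ys ++ (successorsB u0).map (fun w => (w, s0 + 1)))).length
                  + 6 * xs'.length + 1 =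
                  ((u0, s0) :: (xs' ++ (u, s) :: ys)).length + 6 * ((u0, s0) :: xs').length := by
                simp [List.length_append, successorsB]
                omega
              have hadd := REQ_add K
                ((xs' ++ (u, s) :: (ys ++ (successorsB u0).map (fun w => (w, s0 + 1)))).length
                  + 6 * xs'.length) 1
              rw [harith] at hadd
              simp only [List.length_cons] at hadd hfuel
              omega
            obtain ⟨hA, hB⟩ := ihf xs' (ys ++ (successorsB u0).map (fun w => (w, s0 + 1))) u s
              ((u0, s0) :: done) (visited.insert u0) m' S hlevx hm' hdonex
              (VisEq_add s0 hvis) hsS hreach hfuel'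
            simp only [qLoop, if_neg h0n, if_neg hvis0]
            rw [List.append_assoc]
            simp only [List.cons_append]
            exact ⟨hA, hB⟩
          rcases Levels_head_all hlev with hs0' | hall
          · exact hcore m hlev hm (by simpa using hs0') hdone
          · exact hcore (m + 1) (Levels_all _ m hall) (by omega)
              (by simpa using hall (u0, s0) (by simp)) (DoneInv_mono_m hdone (by omega))

theorem qLoop_complete_main (n2 : Int) : ∀ K : Nat, W1 n2 K ∧ W2 n2 K := by
  intro K
  induction K using Nat.strong_induction_on with
  | _ K ih =>
    have hw1 : W1 n2 K := w1_step n2 K (fun K' h => (ih K' h).1) (fun K' h => (ih K' h).2)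
    exact ⟨hw1, w2_step n2 K hw1 (fun K' h => (ih K' h).2)⟩

-- ---- the memoised DFS computes the pure predicate; the B loop returns the least limit ----

theorem reach_zero_ne {t u : Int} (h : ¬ u = t) : reachableB t u 0 = false := by
  rw [reachableB.eq_def]; simp [h]

theorem reach_mono_false {t u : Int} {l l' : Nat} (h : reachableB t u l = false)
    (hle : l' ≤ l) : reachableB t u l' = false := by
  cases hr : reachableB t u l' with
  | false => rfl
  | true => rw [reach_mono l' hr hle] at h; simp at h

-- every entry of the memo dict is a sound "cannot reach n2 within this limit" fact
def DeadInv (n2 : Int) (dead : Std.TreeMap Int Nat) : Prop :=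
  ∀ u : Int, ¬ u = n2 → reachableB n2 u (dead.getD u 0) = false

theorem DeadInv_empty (n2 : Int) : DeadInv n2 Std.TreeMap.empty := by
  intro u hu
  have h0 : (Std.TreeMap.empty : Std.TreeMap Int Nat).getD u 0 = 0 := by simp
  rw [h0]
  exact reach_zero_ne hu

theorem memoList_spec (n2 : Int) : ∀ limit : Nat,
    (∀ (u : Int) (dead : Std.TreeMap Int Nat), DeadInv n2 dead →
      (reachMemo n2 limit u dead).1 = reachableB n2 u limit ∧
        DeadInv n2 (reachMemo n2 limit u dead).2) ∧
    (∀ (vs : List Int) (dead : Std.TreeMap Int Nat), DeadInv n2 dead →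
      (reachListB n2 limit vs dead).1 = vs.any (fun v => reachableB n2 v limit) ∧
        DeadInv n2 (reachListB n2 limit vs dead).2) := by
  intro limit
  induction limit using Nat.strong_induction_on with
  | _ limit ih =>
    have hm : ∀ (u : Int) (dead : Std.TreeMap Int Nat), DeadInv n2 dead →
        (reachMemo n2 limit u dead).1 = reachableB n2 u limit ∧
          DeadInv n2 (reachMemo n2 limit u dead).2 := by
      intro u dead hinv
      rw [reachMemo.eq_def]
      by_cases hun : u = n2
      · simp only [if_pos hun]
        refine ⟨?_, hinv⟩
        rw [hun]
        exact (reach_self n2 limit).symm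
      · simp only [if_neg hun]
        cases limit with
        | zero => exact ⟨(reach_zero_ne hun).symm, hinv⟩
        | succ l =>
          by_cases hdead : dead.getD u 0 ≥ l + 1
          · simp only [if_pos hdead]
            exact ⟨(reach_mono_false (hinv u hun) hdead).symm, hinv⟩
          · simp only [if_neg hdead]
            obtain ⟨hfst, hinv'⟩ := (ih l (by omega)).2 (successorsB u) dead hinv
            cases hres : reachListB n2 l (successorsB u) dead with
            | mk b d' =>
              rw [hres] at hfst hinv'
              simp only at hfst
              cases b with
              | true =>
                refine ⟨?_, hinv'⟩
                rw [reach_succ_iff hun, ← hfst]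
              | false =>
                constructor
                · rw [reach_succ_iff hun, ← hfst]
                · intro w hw
                  have hgi : ((d'.insert u (l + 1)).getD w 0)
                      = if w = u then l + 1 else d'.getD w 0 := by
                    rw [Std.TreeMap.getD_insert]; split_ifs <;> simp_all
                  rw [hgi]
                  by_cases hwu : w = u
                  · rw [if_pos hwu, hwu, reach_succ_iff hun, ← hfst]
                  · rw [if_neg hwu]
                    exact hinv' w hw
    have hl : ∀ (vs : List Int) (dead : Std.TreeMap Int Nat), DeadInv n2 dead →
        (reachListB n2 limit vs dead).1 = vs.any (fun v => reachableB n2 v limit) ∧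
          DeadInv n2 (reachListB n2 limit vs dead).2 := by
      intro vs
      induction vs with
      | nil =>
        intro dead hinv
        have hstep : reachListB n2 limit [] dead = (false, dead) := by
          rw [reachListB.eq_def]
        rw [hstep]
        exact ⟨by simp, hinv⟩
      | cons v rest ihv =>
        intro dead hinv
        have hstep : reachListB n2 limit (v :: rest) dead =
            match reachMemo n2 limit v dead with
            | (true, d') => (true, d')
            | (false, d') => reachListB n2 limit rest d' := by
          rw [reachListB.eq_def]
        rw [hstep]
        obtain ⟨h1, h2⟩ := hm v dead hinv
        cases hres : reachMemo n2 limit v dead with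
        | mk b d' =>
          rw [hres] at h1 h2
          simp only at h1
          cases b with
          | true => exact ⟨by simp [List.any_cons, ← h1], h2⟩
          | false =>
            obtain ⟨h3, h4⟩ := ihv d' h2
            refine ⟨?_, h4⟩
            simp only [List.any_cons, ← h1, Bool.false_or]
            exact h3
    exact ⟨hm, hl⟩

theorem altLoop_eq (n n2 : Int) (d : Nat) (hd : reachableB n2 n d = true)
    (hmin : ∀ j, j < d → ¬ reachableB n2 n j = true) :
    ∀ (fuel limit : Nat) (dead : Std.TreeMap Int Nat), DeadInv n2 dead →
      limit ≤ d → d < limit + fuel → altLoop n n2 fuel limit dead = (d : Int) := by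
  intro fuel
  induction fuel with
  | zero => intro limit dead _ h1 h2; omega
  | succ fuel ih =>
    intro limit dead hinv h1 h2
    rw [altLoop]
    obtain ⟨hfst, hinv'⟩ := (memoList_spec n2 limit).1 n dead hinv
    cases hres : reachMemo n2 limit n dead with
    | mk b d' =>
      rw [hres] at hfst hinv'
      simp only at hfst
      cases b with
      | true =>
        simp only
        have hrt : reachableB n2 n limit = true := hfst.symm
        have : limit = d := by
          rcases Nat.lt_or_ge limit d with h | h
          · exact absurd hrt (hmin limit h)
          · omega
        rw [this]
      | false =>
        simp only
        have hlf : reachableB n2 n limit = false := hfst.symm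
        have hne : limit ≠ d := by
          intro he
          rw [he, hd] at hlf
          simp at hlf
        exact ih (limit + 1) d' hinv' (by omega) (by omega)

-- ===== VERDICT (by name: the statement is the Claim_ definition above) =====
theorem bfs_spec : Claim_equal_bfs := by
  unfold Claim_equal_bfs
  intro n n2 hdom
  unfold Spec_bfs
  have hdom' : n.natAbs ≤ 2 ^ 31 ∧ n2.natAbs ≤ 2 ^ 31 := by
    unfold Dom_bfs pvDomInt at hdom
    simp at hdom
    constructor <;> [skip; skip] <;> omega
  have h99 : reachableB n2 n 99 = true := reach_dom n n2 hdom'.1 hdom'.2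
  have hex : ∃ d, reachableB n2 n d = true := ⟨99, h99⟩
  set d := Nat.find hex with hdd
  have hd : reachableB n2 n d = true := Nat.find_spec hex
  have hmin : ∀ j, j < d → ¬ reachableB n2 n j = true := fun j hj => Nat.find_min hex hj
  have hd99 : d ≤ 99 := Nat.find_min' hex h99
  have hB : bfs_alt n n2 = (d : Int) := by
    unfold bfs_alt pvFuelB
    exact altLoop_eq n n2 d hd hmin 200 0 Std.TreeMap.empty (DeadInv_empty n2) (by omega) (by omega)
  rw [hB]
  by_cases hnn : n = n2
  · have hd0 : d = 0 := by
      rw [hdd, Nat.find_eq_zero]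
      rw [hnn]; exact reach_self n2 0
    rw [hd0]
    simp [bfs, hnn]
  · have hlev : Levels ([] ++ (n, 0) :: []) 0 := ⟨[(n, 0)], [], by simp, by simp, by simp⟩
    have hdinv : DoneInv n2 ([] ++ (n, 0) :: []) [] 0 := by intro p hp; simp at hp
    have hfuel : REQ d (([] ++ (n, (0:Int)) :: [] : List (Int × Int)).length
        + 6 * ([] : List (Int × Int)).length) ≤ pvFuel := by
      have h1 : (([] ++ (n, (0:Int)) :: [] : List (Int × Int)).length
          + 6 * ([] : List (Int × Int)).length) = 1 := by simp
      rw [h1]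
      unfold pvFuel
      calc REQ d 1 ≤ REQ 99 1 := REQ_mono_K' 1 hd99
      _ ≤ 49 ^ 100 * (1 + 30) := REQ_bound 99 1
      _ ≤ 49 ^ 100 * 49 := by
          exact Nat.mul_le_mul_left _ (by norm_num)
      _ = 7 ^ 202 := by
          rw [show (49:Nat) = 7 ^ 2 by norm_num, ← pow_mul, ← pow_add]
      _ ≤ 7 ^ 210 := Nat.pow_le_pow_right (by norm_num) (by norm_num)
    obtain ⟨hge, hle⟩ := (qLoop_complete_main n2 d).1 pvFuel [] [] n 0 [] Std.TreeSet.empty 0 0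
      hlev (le_refl 0) hdinv VisEq_empty (le_refl 0) hd hfuel
    simp only [List.nil_append] at hge hle
    have hq := qLoop_sound n n2 pvFuel [(n, 0)] Std.TreeSet.empty ?_
    · rcases hq with hneg | ⟨k, hk, hrk⟩
      · rw [hneg] at hge; exact absurd hge (by norm_num)
      · have hdk : d ≤ k := Nat.find_min' hex hrk
        rw [hk] at hle
        have hkd : k = d := by
          have : (k : Int) ≤ (d : Int) := by omega
          omega
        unfold bfs
        rw [if_neg hnn, bfsLoop_eq_qLoop]
        simp only [List.reverse_nil, List.append_nil]
        rw [hk, hkd]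
    · intro p hp
      simp only [List.mem_singleton] at hp
      subst hp
      exact ⟨0, rfl, reach_self n 0⟩
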